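-- pv_equiv track=rewrite | github.com/Jmeshesha/3d-tic-tac-toe | PythonServer/nextMove.py | counting_marks_eval_function
-- ===== SOURCE A (Python) =====
-- def counting_marks_eval_function(new_board, currPlayer, n):
--     score = 0
--     for plane, plane_value in enumerate(new_board):
--         for row, row_value in enumerate(plane_value):
--             for col, col_value in enumerate(row_value):
--                 if col_value == currPlayer:
--                     score += 1
--                 if col_value != currPlayer and col_value != " ":
--                     score -= 1
--     return score
-- ===== SOURCE B (Python) =====
-- def counting_marks_eval_function(new_board, currPlayer, n):
--     cells = [c for plane in new_board for row in plane for c in row]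
--     counts = {}
--     for c in cells:
--         counts[c] = counts.get(c, 0) + 1
--     return counts.get(currPlayer, 0) - sum(
--         v for k, v in counts.items() if k != currPlayer and k != " "
--     )
-- ===== Notes on version B (the rewrite author's own statement) =====
-- stated objective: alternative
-- what changed: Replaces the per-cell add/subtract branching scan with flattening the board, building a frequency dictionary once, and computing the score as count[currPlayer] minus the sum of counts over distinct non-currPlayer, non-space values.
import Mathlib
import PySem

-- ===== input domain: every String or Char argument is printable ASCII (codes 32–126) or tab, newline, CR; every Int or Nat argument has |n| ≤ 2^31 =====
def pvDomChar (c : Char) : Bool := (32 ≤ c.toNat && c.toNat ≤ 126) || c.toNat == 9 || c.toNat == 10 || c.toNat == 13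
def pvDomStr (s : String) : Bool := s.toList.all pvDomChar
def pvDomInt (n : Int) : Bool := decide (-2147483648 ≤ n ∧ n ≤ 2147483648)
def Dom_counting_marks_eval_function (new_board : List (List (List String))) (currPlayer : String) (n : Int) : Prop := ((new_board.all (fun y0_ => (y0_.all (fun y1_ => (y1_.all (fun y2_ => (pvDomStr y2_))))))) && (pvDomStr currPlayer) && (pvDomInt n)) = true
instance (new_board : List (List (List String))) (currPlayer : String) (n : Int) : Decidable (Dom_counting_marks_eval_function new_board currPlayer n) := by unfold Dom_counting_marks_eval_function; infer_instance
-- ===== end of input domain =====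

-- B replaces A's per-cell add/subtract branching scan by a flatten + frequency-table pass
-- (dict of counts, then count[currPlayer] minus the counts of the other non-space marks);
-- same cost, alternative structure.

-- ===== PORT A =====
-- literal transliteration: triple enumerate loop with a ±1 accumulator (indices unused)
def counting_marks_eval_function (new_board : List (List (List String))) (currPlayer : String) (n : Int) : Int :=
  new_board.foldl (fun score plane_value =>
    plane_value.foldl (fun score row_value =>
      row_value.foldl (fun score col_value =>
        let score := if col_value == currPlayer then score + 1 else score
        if col_value != currPlayer && col_value != " " then score - 1 else score)
        score)
      score)
    0

-- ===== PORT B =====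
-- literal transliteration of Source B: flatten, build a count dict, then score from the table
def counting_marks_eval_function_alt (new_board : List (List (List String))) (currPlayer : String) (n : Int) : Int :=
  let cells := new_board.flatMap (fun plane => plane.flatMap (fun row => row))
  let counts := cells.foldl (fun d c => d.insert c (d.getD c 0 + 1)) PySem.Dict.empty
  counts.getD currPlayer 0 -
    counts.items.foldl (fun acc kv => if kv.1 != currPlayer && kv.1 != " " then acc + kv.2 else acc) 0

-- ===== PRECONDITION & SPEC =====
def Spec_counting_marks_eval_function (new_board : List (List (List String))) (currPlayer : String) (n : Int) (out : Int) : Prop := out = counting_marks_eval_function_alt new_board currPlayer n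
instance (new_board : List (List (List String))) (currPlayer : String) (n : Int) (out : Int) : Decidable (Spec_counting_marks_eval_function new_board currPlayer n out) := by unfold Spec_counting_marks_eval_function; infer_instance

-- ===== CLAIM (what is proved, stated in full; the proofs are below) =====
def Claim_equal_counting_marks_eval_function : Prop := ∀ (new_board : List (List (List String))) (currPlayer : String) (n : Int), Dom_counting_marks_eval_function new_board currPlayer n → Spec_counting_marks_eval_function new_board currPlayer n (counting_marks_eval_function new_board currPlayer n)

-- ===== LEMMAS AND PROOFS =====

-- the cell test both programs branch on
def pvQ (p : String) (c : String) : Bool := c != p && c != " "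

-- A's innermost loop over one row
theorem pvA_row (p : String) (row : List String) (s : Int) :
    row.foldl (fun score col_value =>
        let score := if col_value == p then score + 1 else score
        if col_value != p && col_value != " " then score - 1 else score) s
      = s + (row.count p : Int) - (row.countP (pvQ p) : Int) := by
  induction row generalizing s with
  | nil => simp
  | cons c t ih =>
    rw [List.foldl_cons, ih]
    simp only [List.count_cons, List.countP_cons, pvQ]
    by_cases h2 : c = " "
    · subst h2
      by_cases h1 : " " = p <;> simp [h1] <;> ring
    · by_cases h1 : c = p <;> simp [h1, h2] <;> push_cast <;> ring

-- A's middle loop over one plane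
theorem pvA_plane (p : String) (plane : List (List String)) (s : Int) :
    plane.foldl (fun score row_value =>
      row_value.foldl (fun score col_value =>
        let score := if col_value == p then score + 1 else score
        if col_value != p && col_value != " " then score - 1 else score) score) s
      = s + ((plane.flatMap (fun r => r)).count p : Int)
          - ((plane.flatMap (fun r => r)).countP (pvQ p) : Int) := by
  induction plane generalizing s with
  | nil => simp
  | cons r t ih =>
    rw [List.foldl_cons, pvA_row, ih]
    simp only [List.flatMap_cons, List.count_append, List.countP_append]
    push_cast; ring

-- A's outer loop over the whole board
theorem pvA_board (p : String) (b : List (List (List String))) (s : Int) :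
    b.foldl (fun score plane_value =>
      plane_value.foldl (fun score row_value =>
        row_value.foldl (fun score col_value =>
          let score := if col_value == p then score + 1 else score
          if col_value != p && col_value != " " then score - 1 else score)
          score)
        score) s
      = s + ((b.flatMap (fun pl => pl.flatMap (fun r => r))).count p : Int)
          - ((b.flatMap (fun pl => pl.flatMap (fun r => r))).countP (pvQ p) : Int) := by
  induction b generalizing s with
  | nil => simp
  | cons pl t ih =>
    rw [List.foldl_cons, pvA_plane, ih]
    simp only [List.flatMap_cons, List.count_append, List.countP_append]
    push_cast; ring

-- A as a function of the flattened cell list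
theorem pvA_eq (p : String) (b : List (List (List String))) (n : Int) :
    counting_marks_eval_function b p n
      = ((b.flatMap (fun pl => pl.flatMap (fun r => r))).count p : Int)
        - ((b.flatMap (fun pl => pl.flatMap (fun r => r))).countP (pvQ p) : Int) := by
  unfold counting_marks_eval_function
  rw [pvA_board]; ring

-- B's summation loop over the dict items
theorem pvFoldl_items (p : String) (l : List (String × Int)) (a : Int) :
    l.foldl (fun acc kv => if kv.1 != p && kv.1 != " " then acc + kv.2 else acc) a
      = a + ((l.filter (fun kv => kv.1 != p && kv.1 != " ")).map (fun kv => kv.2)).sum := by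
  induction l generalizing a with
  | nil => simp
  | cons x t ih =>
    rw [List.foldl_cons, List.filter_cons]
    by_cases h : (x.1 != p && x.1 != " ") = true
    · rw [if_pos h, if_pos h, ih]
      simp only [List.map_cons, List.sum_cons]; ring
    · rw [if_neg h, if_neg h, ih]

-- sum of counts over the distinct values satisfying q = countP q (via dedup, up to permutation)
theorem pvSum_counts (q : String → Bool) (cells : List String) :
    (((PySem.Set.ofList cells).filter q).map (fun k => (cells.count k : Int))).sum
      = (cells.countP q : Int) := by
  have hperm : List.Perm (PySem.Set.ofList cells) cells.dedup := by
    rw [List.perm_ext_iff_of_nodup (PySem.Set.nodup_ofList cells) cells.nodup_dedup]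
    intro a; rw [PySem.Set.mem_ofList, List.mem_dedup]
  rw [((hperm.filter q).map (fun k => (cells.count k : Int))).sum_eq]
  calc ((cells.dedup.filter q).map (fun k => (cells.count k : Int))).sum
      = (((cells.dedup.filter q).map (fun k => cells.count k)).sum : Int) := by
        rw [Nat.cast_list_sum, List.map_map]; rfl
    _ = (cells.countP q : Int) := by rw [List.sum_map_count_dedup_filter_eq_countP]

-- B as a function of the flattened cell list
theorem pvB_eq (p : String) (b : List (List (List String))) (n : Int) :
    counting_marks_eval_function_alt b p n
      = ((b.flatMap (fun pl => pl.flatMap (fun r => r))).count p : Int)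
        - ((b.flatMap (fun pl => pl.flatMap (fun r => r))).countP (pvQ p) : Int) := by
  unfold counting_marks_eval_function_alt
  set cells := b.flatMap (fun pl => pl.flatMap (fun r => r)) with hc
  simp only [PySem.Dict.foldl_insert_getD_add_one_eq_counter, PySem.Dict.getD_counter,
    PySem.Dict.items_counter]
  rw [pvFoldl_items, List.filter_map, List.map_map]
  have h1 : (PySem.Set.ofList cells).filter
        ((fun kv : String × Int => kv.1 != p && kv.1 != " ") ∘ (fun k => (k, (cells.count k : Int))))
      = (PySem.Set.ofList cells).filter (pvQ p) := by
    apply List.filter_congr; intro x _; rfl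
  have h2 : ((fun kv : String × Int => kv.2) ∘ (fun k : String => (k, (cells.count k : Int))))
      = fun k : String => (cells.count k : Int) := rfl
  rw [h1, h2, pvSum_counts (pvQ p) cells]
  ring

-- ===== VERDICT (by name: the statement is the Claim_ definition above) =====
theorem counting_marks_eval_function_spec : Claim_equal_counting_marks_eval_function := by
  intro b p n _
  unfold Spec_counting_marks_eval_function
  rw [pvA_eq, pvB_eq]
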